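-- pv_equiv track=rewrite | github.com/MGRL2201/CodeIT_Suisse_Hackathon-Credit_Suisse | codeitsuisse/routes/dns.py | helper
-- ===== SOURCE A (Python) =====
-- from collections import OrderedDict
--
-- class Cache:
--     def __init__(self, capacity: int):
--         self.capacity = capacity
--         self.cache = OrderedDict()
--
--     def get(self, key: str) -> str:
--         if key in self.cache:
--             value = self.cache[key]
--             del self.cache[key]
--             self.cache[key] = value
--             return self.cache[key]
--         return ""
--
--     def put(self, key: str, value: str) -> None:
--         if key in self.cache:
--             del self.cache[key]
--         self.cache[key] = value
--         if len(self.cache) > self.capacity: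
--             for k in self.cache:
--                 del self.cache[k]
--                 break
--
-- def helper(cache_size, log, db):
--     cache = Cache(cache_size)
--     res = []
--     for item in log:
--         val = cache.get(item)
--         if val == "":
--             if item not in db:
--                 res.append({"status": "invalid", "ipAddress": None})
--             else:
--                 cache.put(item, db[item])
--                 res.append({"status": "cache miss", "ipAddress": db[item]})
--         else:
--             res.append({"status": "cache hit", "ipAddress": val})
--     return res
-- ===== SOURCE B (Python) =====
-- def cache_value(cache_size, log, db, i):
--     """Value an LRU cache of the given capacity returns for request log[i].
--
--     Stateless reformulation via the LRU inclusion property: a key is still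
--     cached at position i iff fewer than cache_size distinct db-known keys
--     were requested since its previous request; the cache stores db values,
--     and "" signals a miss (no previous request, or evicted since).
--     """
--     item = log[i]
--     j = i - 1
--     while j >= 0 and log[j] != item:
--         j -= 1
--     if j < 0:
--         return ""
--     if len({x for x in log[j + 1:i] if x in db}) < cache_size:
--         return db[item]
--     return ""
--
-- def helper(cache_size, log, db):
--     res = []
--     for i in range(len(log)):
--         item = log[i]
--         if item not in db:
--             res.append({"status": "invalid", "ipAddress": None})
--         else:
--             val = cache_value(cache_size, log, db, i)
--             if val == "":
--                 res.append({"status": "cache miss", "ipAddress": db[item]})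
--             else:
--                 res.append({"status": "cache hit", "ipAddress": val})
--     return res
-- ===== Notes on version B (the rewrite author's own statement) =====
-- stated objective: alternative
-- what changed: Removes the cache simulation entirely: instead of maintaining a stateful LRU structure, each log position is classified on its own by the LRU inclusion property (a key is cached iff fewer than cache_size distinct db-known keys occur in the log since its previous request), computed with a backward scan and a set over the intervening window.
import Mathlib
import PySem

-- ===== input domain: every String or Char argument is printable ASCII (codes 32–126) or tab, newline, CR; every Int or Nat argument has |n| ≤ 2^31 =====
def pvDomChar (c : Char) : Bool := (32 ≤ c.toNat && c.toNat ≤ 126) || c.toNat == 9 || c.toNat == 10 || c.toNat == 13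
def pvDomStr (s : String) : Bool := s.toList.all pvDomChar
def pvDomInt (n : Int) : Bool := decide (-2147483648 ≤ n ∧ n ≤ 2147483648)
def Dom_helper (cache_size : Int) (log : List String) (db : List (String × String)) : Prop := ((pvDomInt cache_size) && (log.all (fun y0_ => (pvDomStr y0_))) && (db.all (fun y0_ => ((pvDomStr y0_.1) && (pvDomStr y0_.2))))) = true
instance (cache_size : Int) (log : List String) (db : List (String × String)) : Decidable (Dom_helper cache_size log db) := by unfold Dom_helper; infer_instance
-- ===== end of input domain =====

-- B removes the cache simulation: each log position is classified on its own by the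
-- LRU inclusion property (a key is cached iff fewer than cache_size distinct db-known
-- keys occur since its previous request), via a backward scan and a window set
-- (objective: alternative).

-- shared helper: lookup in the db dict parameter (association list, first match)
def dbGet? (db : List (String × String)) (k : String) : Option String :=
  (db.find? (fun p => p.1 == k)).map (·.2)

-- ===== PORT A =====
-- Cache.get: on a hit, delete and re-insert the key, return the stored value; "" on a miss
def cacheGetA (cache : PySem.Dict String String) (key : String) :
    String × PySem.Dict String String :=
  if cache.contains key then
    let value := (cache.get? key).getD ""
    let c := (cache.erase key).insert key value
    ((c.get? key).getD "", c)
  else ("", cache)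

-- Cache.put: delete if present, insert, then evict the first (oldest) key if over capacity
def cachePutA (capacity : Int) (cache : PySem.Dict String String) (key value : String) :
    PySem.Dict String String :=
  let c0 := if cache.contains key then cache.erase key else cache
  let c1 := c0.insert key value
  if (c1.size : Int) > capacity then
    match c1.keys with          -- 'for k in self.cache: del self.cache[k]; break'
    | [] => c1
    | k :: _ => c1.erase k
  else c1

-- loop body of A's 'for item in log'
def stepA (cache_size : Int) (db : List (String × String))
    (st : PySem.Dict String String × List (List (String × Option String))) (item : String) :
    PySem.Dict String String × List (List (String × Option String)) :=
  let r := cacheGetA st.1 item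
  if r.1 == "" then
    match dbGet? db item with
    | none => (r.2, st.2 ++ [[("status", some "invalid"), ("ipAddress", none)]])
    | some v => (cachePutA cache_size r.2 item v,
        st.2 ++ [[("status", some "cache miss"), ("ipAddress", some v)]])
  else (r.2, st.2 ++ [[("status", some "cache hit"), ("ipAddress", some r.1)]])

def helper (cache_size : Int) (log : List String) (db : List (String × String)) :
    List (List (String × Option String)) :=
  (log.foldl (stepA cache_size db) (PySem.Dict.empty, [])).2

-- ===== PORT B =====
-- 'while j >= 0 and log[j] != item: j -= 1' scanning backwards from i-1 for item
def scanPrev (log : List String) (item : String) : Nat → Option Nat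
  | 0 => none
  | j + 1 => if log.getD j "" == item then some j else scanPrev log item j

-- cache_value: the value an LRU cache of this capacity returns for request log[i]
def cacheValue (cache_size : Int) (log : List String) (db : List (String × String))
    (i : Nat) : String :=
  match scanPrev log (log.getD i "") i with
  | none => ""
  | some j =>
      if ((PySem.Set.ofList ((PySem.List.slice log (some ((j : Int) + 1)) (some (i : Int))).filter
            (fun x => (dbGet? db x).isSome))).length : Int) < cache_size then
        (dbGet? db (log.getD i "")).getD ""
      else ""

-- loop body of B's 'for i in range(len(log))'
def entryB (cache_size : Int) (log : List String) (db : List (String × String))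
    (i : Nat) : List (String × Option String) :=
  let item := log.getD i ""
  match dbGet? db item with
  | none => [("status", some "invalid"), ("ipAddress", none)]
  | some ip =>
      let val := cacheValue cache_size log db i
      if val == "" then [("status", some "cache miss"), ("ipAddress", some ip)]
      else [("status", some "cache hit"), ("ipAddress", some val)]

def helper_alt (cache_size : Int) (log : List String) (db : List (String × String)) :
    List (List (String × Option String)) :=
  (List.range log.length).foldl (fun res i => res ++ [entryB cache_size log db i]) []

-- ===== PRECONDITION & SPEC =====
def Spec_helper (cache_size : Int) (log : List String) (db : List (String × String)) (out : List (List (String × Option String))) : Prop := out = helper_alt cache_size log db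
instance (cache_size : Int) (log : List String) (db : List (String × String)) (out : List (List (String × Option String))) : Decidable (Spec_helper cache_size log db out) := by unfold Spec_helper; infer_instance

-- ===== CLAIM (what is proved, stated in full; the proofs are below) =====
def Claim_equal_helper : Prop := ∀ (cache_size : Int) (log : List String) (db : List (String × String)), Dom_helper cache_size log db → Spec_helper cache_size log db (helper cache_size log db)

-- ===== LEMMAS AND PROOFS =====

-- is a key present in the db?
def validB (db : List (String × String)) (x : String) : Bool := (dbGet? db x).isSome

-- proof device: the recency-list simulation that A's OrderedDict realises.
-- state = keys currently cached, MRU first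
def simStep (cache_size : Int) (db : List (String × String))
    (st : List String × List (List (String × Option String))) (item : String) :
    List String × List (List (String × Option String)) :=
  match dbGet? db item with
  | none => (st.1, st.2 ++ [[("status", some "invalid"), ("ipAddress", none)]])
  | some ip =>
    if st.1.contains item && ip != "" then
      (item :: st.1.erase item,
       st.2 ++ [[("status", some "cache hit"), ("ipAddress", some ip)]])
    else
      let r0 := if st.1.contains item then st.1.erase item else st.1
      (PySem.List.slice (item :: r0) none (some cache_size),
       st.2 ++ [[("status", some "cache miss"), ("ipAddress", some ip)]])

-- proof device: the full (untruncated) recency stack of the db-known keys of a prefix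
def recF (db : List (String × String)) (r : List String) (x : String) : List String :=
  if validB db x then x :: r.erase x else r

def recFull (db : List (String × String)) (p : List String) : List String :=
  p.foldl (recF db) []

-- A's cached value for a key (put only ever stores the db value)
def valOf (db : List (String × String)) (k : String) : String := (dbGet? db k).getD ""

-- A's cache contents as determined by the recency list (oldest first in the dict)
def model (db : List (String × String)) (r : List String) : List (String × String) :=
  r.reverse.map (fun k => (k, valOf db k))

-- the coupling invariant between A's dict and the recency list
def CacheInv (cs : Int) (db : List (String × String)) (r : List String)
    (c : PySem.Dict String String) : Prop :=
  r.Nodup ∧ (∀ k ∈ r, (dbGet? db k).isSome) ∧ (r.length : Int) ≤ max cs 0 ∧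
    c = PySem.Dict.mk (model db r)

lemma find_model (db : List (String × String)) (l : List String) (x : String)
    (h : x ∈ l) :
    (l.map (fun k => (k, valOf db k))).find? (fun p => p.1 == x)
      = some (x, valOf db x) := by
  induction l with
  | nil => cases h
  | cons a t ih =>
    by_cases hax : a = x
    · subst hax; simp
    · have ht : x ∈ t := by cases h with
        | head => exact absurd rfl hax
        | tail _ h' => exact h'
      simp [hax, ih ht]

lemma find_model_none (db : List (String × String)) (l : List String) (x : String)
    (h : x ∉ l) :
    (l.map (fun k => (k, valOf db k))).find? (fun p => p.1 == x) = none := by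
  rw [List.find?_eq_none]
  rintro ⟨k, v⟩ hm
  simp only [List.mem_map] at hm
  obtain ⟨a, ha, heq⟩ := hm
  cases heq
  simp only [beq_iff_eq]
  intro hax
  exact h (hax ▸ ha)

lemma contains_model (db : List (String × String)) (r : List String) (x : String) :
    (PySem.Dict.mk (model db r)).contains x = r.contains x := by
  by_cases h : x ∈ r
  · have h1 : (PySem.Dict.mk (model db r)).get? x = some (x, valOf db x).2 := by
      simp only [PySem.Dict.get?, model, find_model db r.reverse x (by simpa using h)]
      rfl
    have h2 : (PySem.Dict.mk (model db r)).contains x = true := by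
      rw [PySem.Dict.contains_eq_isSome_get?, h1]; rfl
    rw [h2]; exact (by simp [h] : r.contains x = true).symm
  · have h1 : (PySem.Dict.mk (model db r)).get? x = none := by
      simp only [PySem.Dict.get?, model, find_model_none db r.reverse x (by simpa using h)]
      rfl
    have h2 : (PySem.Dict.mk (model db r)).contains x = false := by
      rw [PySem.Dict.contains_eq_isSome_get?, h1]; rfl
    rw [h2]; exact (by simp [h] : r.contains x = false).symm

lemma get?_model (db : List (String × String)) (r : List String) (x : String) (h : x ∈ r) :
    (PySem.Dict.mk (model db r)).get? x = some (valOf db x) := by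
  simp only [PySem.Dict.get?, model, find_model db r.reverse x (by simpa using h)]
  rfl

lemma erase_model (db : List (String × String)) (r : List String) (x : String)
    (hnd : r.Nodup) :
    (PySem.Dict.mk (model db r)).erase x = PySem.Dict.mk (model db (r.erase x)) := by
  simp only [PySem.Dict.erase, model]
  congr 1
  rw [List.filter_map, List.filter_reverse]
  rw [show r.erase x = r.filter (fun b => !(b == x)) from hnd.erase_eq_filter x]
  rfl

lemma insert_model (db : List (String × String)) (r : List String) (x : String)
    (h : x ∉ r) :
    (PySem.Dict.mk (model db r)).insert x (valOf db x)
      = PySem.Dict.mk (model db (x :: r)) := by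
  have hc : (PySem.Dict.mk (model db r)).contains x = false := by
    rw [contains_model]; simp [h]
  simp only [PySem.Dict.insert, hc]
  simp [model]

lemma keys_model (db : List (String × String)) (r : List String) :
    (PySem.Dict.mk (model db r)).keys = r.reverse := by
  simp [PySem.Dict.keys, model, Function.comp_def]

lemma erase_last_model (db : List (String × String)) (r : List String)
    (hnd : r.Nodup) (h : r ≠ []) :
    (PySem.Dict.mk (model db r)).erase (r.getLast h)
      = PySem.Dict.mk (model db r.dropLast) := by
  rw [erase_model db r _ hnd]
  congr 2
  have hsplit : r.dropLast ++ [r.getLast h] = r := List.dropLast_append_getLast h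
  have hnm : r.getLast h ∉ r.dropLast := by
    intro hm
    have := hsplit ▸ hnd
    rw [List.nodup_append] at this
    exact this.2.2 _ hm _ (List.mem_singleton.mpr rfl) rfl
  calc r.erase (r.getLast h)
      = (r.dropLast ++ [r.getLast h]).erase (r.getLast h) := by rw [hsplit]
    _ = r.dropLast ++ ([r.getLast h]).erase (r.getLast h) := List.erase_append_right _ (by
          simpa using hnm)
    _ = r.dropLast := by simp

lemma slice_of_len_le {α : Type} (l : List α) (cs : Int) (h : (l.length : Int) ≤ cs) :
    PySem.List.slice l none (some cs) = l := by
  have h0 : (0 : Int) ≤ cs := le_trans (by exact_mod_cast Nat.zero_le _) h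
  rw [PySem.List.slice_to _ h0]
  exact List.take_of_length_le (by omega)

lemma slice_single_neg {α : Type} (x : α) (cs : Int) (h : cs < 0) :
    PySem.List.slice [x] none (some cs) = [] := by
  have hk : cs = -(((-cs).toNat : Nat) : Int) := by omega
  rw [hk, PySem.List.slice_to_neg_natCast _ _ (by omega)]
  simp
  omega

lemma step_inv (cs : Int) (db : List (String × String)) (item : String)
    (r : List String) (c : PySem.Dict String String)
    (res : List (List (String × Option String))) (h : CacheInv cs db r c) :
    (stepA cs db (c, res) item).2 = (simStep cs db (r, res) item).2 ∧
      CacheInv cs db (simStep cs db (r, res) item).1 (stepA cs db (c, res) item).1 := by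
  obtain ⟨hnd, hsome, hlen, hc⟩ := h
  subst hc
  cases hdb : dbGet? db item with
  | none =>
    have hnr : item ∉ r := fun hm => by simpa [hdb] using hsome item hm
    have hcont : (PySem.Dict.mk (model db r)).contains item = false := by
      rw [contains_model]; simp [hnr]
    constructor
    · simp [stepA, simStep, cacheGetA, hcont, hdb]
    · simp only [stepA, simStep, cacheGetA, hcont, hdb]
      simp only [Bool.false_eq_true, if_false]
      exact ⟨hnd, hsome, hlen, rfl⟩
  | some ip =>
    have hval : valOf db item = ip := by simp [valOf, hdb]
    by_cases hm : item ∈ r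
    · -- item is cached
      have hne : r ≠ [] := List.ne_nil_of_mem hm
      have hpos : (1 : Int) ≤ (r.length : Int) := by
        exact_mod_cast List.length_pos_iff.mpr hne
      have hcs : (r.length : Int) ≤ cs := by
        rcases max_cases cs 0 with ⟨h1, _⟩ | ⟨h1, _⟩ <;> omega
      have hcont : (PySem.Dict.mk (model db r)).contains item = true := by
        rw [contains_model]; simp [hm]
      have hcontL : r.contains item = true := by simp [hm]
      have hget : (PySem.Dict.mk (model db r)).get? item = some ip := by
        rw [get?_model db r item hm, hval]
      have hnm' : item ∉ r.erase item := hnd.not_mem_erase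
      have hndE : (r.erase item).Nodup := hnd.erase item
      have hcache1 : ((PySem.Dict.mk (model db r)).erase item).insert item ip
          = PySem.Dict.mk (model db (item :: r.erase item)) := by
        rw [erase_model db r item hnd, show ip = valOf db item from hval.symm,
          insert_model db (r.erase item) item hnm']
      have hget2 : (PySem.Dict.mk (model db (item :: r.erase item))).get? item
          = some ip := by
        rw [get?_model _ _ _ List.mem_cons_self, hval]
      have hlen1 : (item :: r.erase item).length = r.length := by
        have := List.length_erase_of_mem hm
        simp only [List.length_cons, this]
        omega
      have hnd1 : (item :: r.erase item).Nodup := List.nodup_cons.mpr ⟨hnm', hndE⟩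
      have hsome1 : ∀ k ∈ item :: r.erase item, (dbGet? db k).isSome := by
        intro k hk
        rcases List.mem_cons.mp hk with hk | hk
        · subst hk; simp [hdb]
        · exact hsome k (List.mem_of_mem_erase hk)
      have hlenInv : ((item :: r.erase item).length : Int) ≤ max cs 0 := by
        rw [hlen1]
        rcases max_cases cs 0 with ⟨h1, _⟩ | ⟨h1, _⟩ <;> omega
      by_cases hip : ip = ""
      · -- stored value is "": get returns "", so A re-puts; sim takes its miss branch
        subst hip
        have hcont1 : (PySem.Dict.mk (model db (item :: r.erase item))).contains item
            = true := by rw [contains_model]; simp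
        have hnoev : ¬ (((PySem.Dict.mk (model db (item :: r.erase item))).size : Int) > cs) := by
          simp only [PySem.Dict.size, model, List.length_map, List.length_reverse]
          rw [hlen1]; omega
        have hput : cachePutA cs (PySem.Dict.mk (model db (item :: r.erase item))) item ""
            = PySem.Dict.mk (model db (item :: r.erase item)) := by
          have e1 : (PySem.Dict.mk (model db (item :: r.erase item))).erase item
              = PySem.Dict.mk (model db (r.erase item)) := by
            rw [erase_model db _ item hnd1, List.erase_cons_head]
          have e2 : (PySem.Dict.mk (model db (r.erase item))).insert item ""
              = PySem.Dict.mk (model db (item :: r.erase item)) := by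
            rw [show ("" : String) = valOf db item from hval.symm,
              insert_model db (r.erase item) item hnm']
          simp [cachePutA, hcont1, e1, e2, hnoev]
        have hA : stepA cs db (PySem.Dict.mk (model db r), res) item
            = (PySem.Dict.mk (model db (item :: r.erase item)),
               res ++ [[("status", some "cache miss"), ("ipAddress", some "")]]) := by
          simp [stepA, cacheGetA, hcont, hget, hcache1, hget2, hdb, hput]
        have hB : simStep cs db (r, res) item
            = (item :: r.erase item,
               res ++ [[("status", some "cache miss"), ("ipAddress", some "")]]) := by
          have hsl : PySem.List.slice (item :: r.erase item) none (some cs)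
              = item :: r.erase item := slice_of_len_le _ cs (by rw [hlen1]; omega)
          simp [simStep, hdb, hsl, hm]
        rw [hA, hB]
        exact ⟨rfl, hnd1, hsome1, hlenInv, rfl⟩
      · -- genuine cache hit on both sides
        have hA : stepA cs db (PySem.Dict.mk (model db r), res) item
            = (PySem.Dict.mk (model db (item :: r.erase item)),
               res ++ [[("status", some "cache hit"), ("ipAddress", some ip)]]) := by
          simp [stepA, cacheGetA, hcont, hget, hcache1, hget2, hip]
        have hB : simStep cs db (r, res) item
            = (item :: r.erase item,
               res ++ [[("status", some "cache hit"), ("ipAddress", some ip)]]) := by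
          simp [simStep, hdb, hip, hm]
        rw [hA, hB]
        exact ⟨rfl, hnd1, hsome1, hlenInv, rfl⟩
    · -- item not cached: miss, insert at front, maybe evict
      have hcont : (PySem.Dict.mk (model db r)).contains item = false := by
        rw [contains_model]; simp [hm]
      have hcontL : r.contains item = false := by simp [hm]
      have hnd1 : (item :: r).Nodup := List.nodup_cons.mpr ⟨hm, hnd⟩
      have hsome1 : ∀ k ∈ item :: r, (dbGet? db k).isSome := by
        intro k hk
        rcases List.mem_cons.mp hk with hk | hk
        · subst hk; simp [hdb]
        · exact hsome k hk
      have hins : (PySem.Dict.mk (model db r)).insert item ip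
          = PySem.Dict.mk (model db (item :: r)) := by
        rw [show ip = valOf db item from hval.symm, insert_model db r item hm]
      have hsize : ((PySem.Dict.mk (model db (item :: r))).size : Int)
          = (r.length : Int) + 1 := by
        simp [PySem.Dict.size, model]
      by_cases hev : ((r.length : Int) + 1 > cs)
      · -- eviction
        have hne1 : (item :: r) ≠ [] := List.cons_ne_nil _ _
        have hsplit : (item :: r).dropLast ++ [(item :: r).getLast hne1] = item :: r :=
          List.dropLast_append_getLast hne1
        have hkeys : (PySem.Dict.mk (model db (item :: r))).keys
            = (item :: r).getLast hne1 :: (item :: r).dropLast.reverse := by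
          rw [keys_model]
          conv_lhs => rw [← hsplit]
          simp
        have hgt : (((PySem.Dict.mk (model db (item :: r))).size : Int) > cs) := by
          rw [hsize]; omega
        have hput : cachePutA cs (PySem.Dict.mk (model db r)) item ip
            = PySem.Dict.mk (model db (item :: r).dropLast) := by
          have e1 := erase_last_model db (item :: r) hnd1 hne1
          simp [cachePutA, hcont, hins, hgt, hkeys, e1]
        have hA : stepA cs db (PySem.Dict.mk (model db r), res) item
            = (PySem.Dict.mk (model db (item :: r).dropLast),
               res ++ [[("status", some "cache miss"), ("ipAddress", some ip)]]) := by
          simp [stepA, cacheGetA, hcont, hdb, hput]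
        by_cases hcs0 : 0 ≤ cs
        · have htake : PySem.List.slice (item :: r) none (some cs) = (item :: r).dropLast := by
            have hcseq : (r.length : Int) = cs := by
              rcases max_cases cs 0 with ⟨h1, _⟩ | ⟨h1, _⟩ <;> omega
            rw [PySem.List.slice_to _ hcs0, List.dropLast_eq_take]
            congr 1
            simp only [List.length_cons]
            omega
          have hB : simStep cs db (r, res) item
              = ((item :: r).dropLast,
                 res ++ [[("status", some "cache miss"), ("ipAddress", some ip)]]) := by
            simp only [simStep, hdb, hcontL, Bool.false_and, Bool.false_eq_true, if_false,
              htake]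
          rw [hA, hB]
          refine ⟨rfl, hnd1.sublist (List.dropLast_sublist _), ?_, ?_, rfl⟩
          · exact fun k hk => hsome1 k (List.mem_of_mem_dropLast hk)
          · have hdl : (item :: r).dropLast.length = r.length := by simp
            rw [hdl]
            rcases max_cases cs 0 with ⟨h1, _⟩ | ⟨h1, _⟩ <;> omega
        · -- negative capacity: the cache was empty, the new entry is evicted at once
          have hr0 : r = [] := by
            rcases max_cases cs 0 with ⟨h1, _⟩ | ⟨h1, _⟩
            · omega
            · exact List.length_eq_zero_iff.mp (by omega)
          subst hr0
          have hB : simStep cs db ([], res) item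
              = ([], res ++ [[("status", some "cache miss"), ("ipAddress", some ip)]]) := by
            simp only [simStep, hdb, List.contains_nil, Bool.false_and, Bool.false_eq_true,
              if_false]
            rw [slice_single_neg item cs (by omega)]
          rw [hA, hB]
          refine ⟨?_, List.nodup_nil, by simp, by simp, rfl⟩
          have : (item :: ([] : List String)).dropLast = [] := rfl
          rw [this]
      · -- no eviction
        have hle : ¬ (((PySem.Dict.mk (model db (item :: r))).size : Int) > cs) := by
          rw [hsize]; omega
        have hput : cachePutA cs (PySem.Dict.mk (model db r)) item ip
            = PySem.Dict.mk (model db (item :: r)) := by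
          simp [cachePutA, hcont, hins, hle]
        have hA : stepA cs db (PySem.Dict.mk (model db r), res) item
            = (PySem.Dict.mk (model db (item :: r)),
               res ++ [[("status", some "cache miss"), ("ipAddress", some ip)]]) := by
          simp [stepA, cacheGetA, hcont, hdb, hput]
        have hB : simStep cs db (r, res) item
            = (item :: r,
               res ++ [[("status", some "cache miss"), ("ipAddress", some ip)]]) := by
          simp only [simStep, hdb, hcontL, Bool.false_and, Bool.false_eq_true, if_false]
          rw [slice_of_len_le _ cs (by simp only [List.length_cons]; push_cast; omega)]
        rw [hA, hB]
        refine ⟨rfl, hnd1, hsome1, ?_, rfl⟩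
        simp only [List.length_cons]
        rcases max_cases cs 0 with ⟨h1, _⟩ | ⟨h1, _⟩ <;> push_cast <;> omega

-- ===== the recency list as a function of the processed prefix (stack-distance side) =====

lemma mem_foldFrom (db : List (String × String)) (p : List String) :
    ∀ (r0 : List String) (z : String),
      z ∈ p.foldl (recF db) r0 ↔ (z ∈ p ∧ validB db z = true) ∨ z ∈ r0 := by
  induction p with
  | nil => intro r0 z; simp
  | cons y t ih =>
    intro r0 z
    rw [List.foldl_cons, ih]
    unfold recF
    by_cases hv : validB db y = true
    · simp only [hv, if_true]
      by_cases hz : z = y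
      · subst hz; simp [hv]
      · simp only [List.mem_cons, hz, false_or, List.mem_erase_of_ne hz]
    · rw [Bool.not_eq_true] at hv
      simp only [hv, Bool.false_eq_true, if_false]
      by_cases hz : z = y
      · subst hz; simp [hv]
      · simp [hz]

lemma mem_recFull (db : List (String × String)) (p : List String) (z : String) :
    z ∈ recFull db p ↔ z ∈ p ∧ validB db z = true := by
  unfold recFull
  rw [mem_foldFrom db p [] z]
  simp

lemma nodup_foldFrom (db : List (String × String)) (p : List String) :
    ∀ (r0 : List String), r0.Nodup → (p.foldl (recF db) r0).Nodup := by
  induction p with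
  | nil => intro r0 h; simpa using h
  | cons y t ih =>
    intro r0 h
    rw [List.foldl_cons]
    apply ih
    unfold recF
    split
    · exact List.nodup_cons.mpr ⟨h.not_mem_erase, h.erase y⟩
    · exact h

lemma nodup_recFull (db : List (String × String)) (p : List String) :
    (recFull db p).Nodup := nodup_foldFrom db p [] List.nodup_nil

-- processing p on top of a state r0: new keys go in front, survivors of r0 keep order
lemma foldFrom_decomp (db : List (String × String)) (p : List String) :
    ∀ (r0 : List String), r0.Nodup →
      p.foldl (recF db) r0
        = recFull db p ++ r0.filter (fun a => !(recFull db p).contains a) := by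
  induction p with
  | nil => intro r0 h; simp [recFull]
  | cons y t ih =>
    intro r0 hnd
    have hcons : recFull db (y :: t) = t.foldl (recF db) (recF db [] y) := by
      simp [recFull, List.foldl_cons]
    by_cases hv : validB db y = true
    · have hstep : (recF db r0 y).Nodup := by
        simp only [recF, hv, if_true]
        exact List.nodup_cons.mpr ⟨hnd.not_mem_erase, hnd.erase y⟩
      have hyt : recFull db (y :: t)
          = recFull db t ++ (if (recFull db t).contains y then [] else [y]) := by
        rw [hcons]
        have h1 : recF db ([] : List String) y = [y] := by simp [recF, hv]
        rw [h1, ih [y] (by simp)]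
        congr 1
        simp [List.filter_cons]
      rw [List.foldl_cons, ih _ hstep]
      have h2 : recF db r0 y = y :: r0.erase y := by simp [recF, hv]
      rw [h2, hyt]
      by_cases hy : y ∈ recFull db t
      · have hcy : (recFull db t).contains y = true := by simpa using hy
        simp only [hcy, if_true, List.append_nil]
        congr 1
        rw [List.filter_cons]
        simp only [hcy, Bool.not_true, Bool.false_eq_true, if_false]
        rw [hnd.erase_eq_filter, List.filter_filter]
        apply List.filter_congr
        intro a _
        by_cases hay : a = y
        · subst hay; simp [hy]
        · simp [hay]
      · have hcy : (recFull db t).contains y = false := by simpa using hy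
        simp only [hcy, Bool.false_eq_true, if_false]
        rw [List.filter_cons]
        simp only [hcy, Bool.not_false, if_true]
        rw [List.append_assoc, List.singleton_append]
        congr 2
        rw [hnd.erase_eq_filter, List.filter_filter]
        apply List.filter_congr
        intro a _
        by_cases hay : a = y
        · subst hay; simp
        · simp [hay]
    · rw [Bool.not_eq_true] at hv
      have h0 : recF db r0 y = r0 := by simp [recF, hv]
      have hyt : recFull db (y :: t) = recFull db t := by
        rw [hcons]
        have h1 : recF db ([] : List String) y = [] := by simp [recF, hv]
        rw [h1]; rfl
      rw [List.foldl_cons, h0, ih r0 hnd, hyt]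

-- the take/erase exchange behind the truncated recency list
lemma take_erase_take {α : Type} [DecidableEq α] :
    ∀ (l : List α) (k : Nat) (x : α),
      ((l.take k).erase x).take (k - 1) = (l.erase x).take (k - 1) := by
  intro l
  induction l with
  | nil => intro k x; simp
  | cons a t ih =>
    intro k x
    cases k with
    | zero => simp
    | succ m =>
      rw [List.take_succ_cons]
      by_cases hax : a = x
      · subst hax
        rw [List.erase_cons_head, List.erase_cons_head]
        simp [List.take_take]
      · rw [List.erase_cons_tail (by simpa using hax),
            List.erase_cons_tail (by simpa using hax)]
        cases m with
        | zero => simp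
        | succ u =>
          simp only [Nat.add_sub_cancel]
          rw [List.take_succ_cons, List.take_succ_cons]
          congr 1
          simpa using ih (u + 1) x

lemma cons_take_erase {α : Type} [DecidableEq α] (l : List α) (k : Nat) (x : α) :
    (x :: (l.take k).erase x).take k = (x :: l.erase x).take k := by
  cases k with
  | zero => simp
  | succ m =>
    rw [List.take_succ_cons, List.take_succ_cons]
    congr 1
    simpa using take_erase_take l (m + 1) x

lemma hit_state_eq {α : Type} [DecidableEq α] (l : List α) (k : Nat) (x : α)
    (h : x ∈ l.take k) :
    x :: (l.take k).erase x = (x :: l.erase x).take k := by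
  cases k with
  | zero => simp at h
  | succ m =>
    have hlen : ((l.take (m + 1)).erase x).length ≤ m := by
      have h1 := List.length_erase_of_mem h
      have h2 : (l.take (m + 1)).length ≤ m + 1 := by
        simp [List.length_take]
      omega
    have h3 : ((l.take (m + 1)).erase x).take m = (l.take (m + 1)).erase x :=
      List.take_of_length_le hlen
    rw [List.take_succ_cons, ← h3]
    congr 1
    simpa using take_erase_take l (m + 1) x

lemma mem_take_middle {α : Type} [DecidableEq α] :
    ∀ (u : List α) (t : List α) (x : α) (k : Nat),
      x ∉ u → (x ∈ (u ++ x :: t).take k ↔ u.length < k) := by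
  intro u
  induction u with
  | nil =>
    intro t x k _
    cases k with
    | zero => simp
    | succ m => simp
  | cons a u' ih =>
    intro t x k hx
    have hxa : x ≠ a := fun h => hx (h ▸ List.mem_cons_self)
    have hxu : x ∉ u' := fun h => hx (List.mem_cons_of_mem a h)
    cases k with
    | zero => simp
    | succ m =>
      rw [List.cons_append, List.take_succ_cons]
      simp only [List.mem_cons, hxa, false_or, List.length_cons, Nat.add_lt_add_iff_right]
      exact ih t x m hxu

-- scanPrev really finds the last previous occurrence
lemma scanPrev_none (log : List String) (x : String) :
    ∀ i : Nat, scanPrev log x i = none → ∀ j < i, log.getD j "" ≠ x := by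
  intro i
  induction i with
  | zero => intro _ j hj; omega
  | succ n ih =>
    intro h j hj
    by_cases hc : (log.getD n "" == x) = true
    · simp only [scanPrev, hc, if_true] at h
      simp at h
    · rw [Bool.not_eq_true] at hc
      simp only [scanPrev, hc, Bool.false_eq_true, if_false] at h
      rcases Nat.lt_succ_iff_lt_or_eq.mp hj with hj' | rfl
      · exact ih h j hj'
      · simpa using hc

lemma scanPrev_some (log : List String) (x : String) :
    ∀ i j : Nat, scanPrev log x i = some j →
      j < i ∧ log.getD j "" = x ∧ ∀ j', j < j' → j' < i → log.getD j' "" ≠ x := by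
  intro i
  induction i with
  | zero => intro j h; simp [scanPrev] at h
  | succ n ih =>
    intro j h
    by_cases hc : (log.getD n "" == x) = true
    · simp only [scanPrev, hc, if_true, Option.some.injEq] at h
      subst h
      refine ⟨Nat.lt_succ_self n, by simpa using hc, ?_⟩
      intro j' h1 h2
      omega
    · rw [Bool.not_eq_true] at hc
      simp only [scanPrev, hc, Bool.false_eq_true, if_false] at h
      obtain ⟨h1, h2, h3⟩ := ih j h
      refine ⟨by omega, h2, ?_⟩
      intro j' hj1 hj2
      rcases Nat.lt_succ_iff_lt_or_eq.mp hj2 with hj' | rfl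
      · exact h3 j' hj1 hj'
      · simpa using hc

-- recFull over an appended element
lemma recFull_append_one (db : List (String × String)) (p : List String) (x : String) :
    recFull db (p ++ [x]) = recF db (recFull db p) x := by
  simp [recFull, List.foldl_append]

-- the per-position entry equality: sim's emitted entry is B's formula entry
lemma entry_eq (cs : Int) (db : List (String × String)) (log : List String) (i : Nat)
    (hi : i < log.length) (res : List (List (String × Option String))) :
    (simStep cs db ((recFull db (log.take i)).take cs.toNat, res) log[i]).2
      = res ++ [entryB cs log db i] := by
  have hgd : log.getD i "" = log[i] := List.getD_eq_getElem log "" hi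
  unfold simStep entryB
  simp only [hgd]
  cases hdb : dbGet? db log[i] with
  | none => simp
  | some ip =>
    simp only
    cases hsp : scanPrev log log[i] i with
    | none =>
      have hnx : log[i] ∉ log.take i := by
        intro hmem
        obtain ⟨m, hm, hmx⟩ := List.mem_iff_getElem.mp hmem
        have hm1 : m < i := by
          have := hm; simp [List.length_take] at this; omega
        have hm2 : m < log.length := by omega
        apply scanPrev_none log log[i] i hsp m hm1
        rw [List.getD_eq_getElem log "" hm2, ← hmx, List.getElem_take]
      have hnF : log[i] ∉ (recFull db (log.take i)).take cs.toNat := by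
        intro hmem
        exact hnx ((mem_recFull db _ _).mp (List.mem_of_mem_take hmem)).1
      have hcv : cacheValue cs log db i = "" := by
        unfold cacheValue
        rw [hgd, hsp]
      simp [hnF, hcv]
    | some j =>
      obtain ⟨hji, hjx, hmax⟩ := scanPrev_some log log[i] i j hsp
      have hjlen : j < log.length := by omega
      have hjx' : log[j] = log[i] := by
        rw [← List.getD_eq_getElem log "" hjlen]; exact hjx
      have hslice : PySem.List.slice log (some ((j : Int) + 1)) (some (i : Int))
          = (log.drop (j + 1)).take (i - (j + 1)) := by
        have hj1 : ((j : Int) + 1) = (((j + 1 : Nat) : Int)) := by push_cast; ring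
        rw [hj1, PySem.List.slice_natCast]
      have hdecomp : log.take i = (log.take j ++ [log[i]]) ++ (log.drop (j + 1)).take (i - (j + 1)) := by
        have h1 : i = (j + 1) + (i - (j + 1)) := by omega
        calc log.take i = log.take ((j + 1) + (i - (j + 1))) := by rw [← h1]
          _ = log.take (j + 1) ++ (log.drop (j + 1)).take (i - (j + 1)) := by
              rw [List.take_add]
          _ = (log.take j ++ [log[i]]) ++ (log.drop (j + 1)).take (i - (j + 1)) := by
              rw [List.take_add_one, List.getElem?_eq_getElem hjlen, hjx']
              rfl
      have hxseg : log[i] ∉ (log.drop (j + 1)).take (i - (j + 1)) := by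
        intro hmem
        obtain ⟨m, hm, hmx⟩ := List.mem_iff_getElem.mp hmem
        have hmlt : m < i - (j + 1) ∧ j + 1 + m < log.length := by
          constructor
          · have := hm; simp [List.length_take, List.length_drop] at this; omega
          · have := hm; simp [List.length_take, List.length_drop] at this; omega
        apply hmax (j + 1 + m) (by omega) (by omega)
        rw [List.getD_eq_getElem log "" (by omega), ← hmx, List.getElem_take,
          List.getElem_drop]
      have hvx : validB db log[i] = true := by simp [validB, hdb]
      have hNtj : (recFull db (log.take j)).Nodup := nodup_recFull db _
      have hr0nd : (log[i] :: (recFull db (log.take j)).erase log[i]).Nodup :=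
        List.nodup_cons.mpr ⟨hNtj.not_mem_erase, hNtj.erase _⟩
      have hxnotseg : log[i] ∉ recFull db ((log.drop (j + 1)).take (i - (j + 1))) :=
        fun hmem => hxseg ((mem_recFull db _ _).mp hmem).1
      have hFdec : recFull db (log.take i)
          = recFull db ((log.drop (j + 1)).take (i - (j + 1))) ++ log[i] ::
            ((recFull db (log.take j)).erase log[i]).filter
              (fun a => !(recFull db ((log.drop (j + 1)).take (i - (j + 1)))).contains a) := by
        rw [hdecomp]
        have hA : ((log.take j ++ [log[i]]).foldl (recF db) ([] : List String))
            = log[i] :: (recFull db (log.take j)).erase log[i] := by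
          rw [List.foldl_append]
          simp [recF, hvx, recFull]
        calc recFull db ((log.take j ++ [log[i]]) ++ (log.drop (j + 1)).take (i - (j + 1)))
            = ((log.drop (j + 1)).take (i - (j + 1))).foldl (recF db)
                ((log.take j ++ [log[i]]).foldl (recF db) []) := by
              simp [recFull, List.foldl_append]
          _ = _ := by
              rw [hA, foldFrom_decomp db _ _ hr0nd, List.filter_cons]
              simp [hxnotseg]
      have hmemiff : log[i] ∈ (recFull db (log.take i)).take cs.toNat
          ↔ (recFull db ((log.drop (j + 1)).take (i - (j + 1)))).length < cs.toNat := by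
        rw [hFdec]
        exact mem_take_middle _ _ _ _ hxnotseg
      have hcnt : (PySem.Set.ofList (((log.drop (j + 1)).take (i - (j + 1))).filter
            (fun z => (dbGet? db z).isSome))).length
          = (recFull db ((log.drop (j + 1)).take (i - (j + 1)))).length := by
        apply List.Perm.length_eq
        rw [List.perm_ext_iff_of_nodup (PySem.Set.nodup_ofList _) (nodup_recFull db _)]
        intro a
        rw [PySem.Set.mem_ofList, List.mem_filter, mem_recFull]
        simp [validB]
      have hcv : cacheValue cs log db i
          = if ((recFull db ((log.drop (j + 1)).take (i - (j + 1)))).length : Int) < cs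
            then ip else "" := by
        unfold cacheValue
        rw [hgd, hsp]
        simp only [hslice, hcnt, hdb, Option.getD_some]
      by_cases hlt : ((recFull db ((log.drop (j + 1)).take (i - (j + 1)))).length : Int) < cs
      · have hkmem : log[i] ∈ (recFull db (log.take i)).take cs.toNat :=
          hmemiff.mpr (by omega)
        by_cases hip : ip = ""
        · subst hip; simp [hkmem, hcv, hlt]
        · simp [hkmem, hcv, hlt, hip]
      · have hkmem : log[i] ∉ (recFull db (log.take i)).take cs.toNat :=
          fun hm => by have := hmemiff.mp hm; omega
        simp [hkmem, hcv, hlt]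

-- the sim state stays the truncated full recency stack
lemma state_eq (cs : Int) (db : List (String × String)) (log : List String) (i : Nat)
    (hi : i < log.length) (res : List (List (String × Option String))) :
    (simStep cs db ((recFull db (log.take i)).take cs.toNat, res) log[i]).1
      = (recFull db (log.take (i + 1))).take cs.toNat := by
  have hx : log.take (i + 1) = log.take i ++ [log[i]] := by
    rw [List.take_add_one, List.getElem?_eq_getElem hi]
    rfl
  rw [hx, recFull_append_one]
  unfold simStep
  cases hdb : dbGet? db log[i] with
  | none =>
    have hv : validB db log[i] = false := by simp [validB, hdb]
    simp [recF, hv]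
  | some ip =>
    have hv : validB db log[i] = true := by simp [validB, hdb]
    simp only [recF, hv, if_true]
    by_cases hmem : log[i] ∈ (recFull db (log.take i)).take cs.toNat
    · have hcont : ((recFull db (log.take i)).take cs.toNat).contains log[i] = true := by
        simpa using hmem
      have hk1 : cs.toNat ≠ 0 := by
        rintro h0
        rw [h0] at hmem
        simp at hmem
      have hcs0 : (0 : Int) ≤ cs := by omega
      by_cases hip : ip = ""
      · subst hip
        rw [if_neg (by rw [hcont]; simp), if_pos hcont]
        rw [PySem.List.slice_to _ hcs0, cons_take_erase]
      · have hbne : (ip != "") = true := by simpa using hip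
        rw [if_pos (by rw [hcont, hbne]; rfl)]
        exact hit_state_eq _ _ _ hmem
    · have hcont : ((recFull db (log.take i)).take cs.toNat).contains log[i] = false := by
        simpa using hmem
      rw [if_neg (by rw [hcont]; simp), if_neg (by simpa using hmem)]
      have he : ((recFull db (log.take i)).take cs.toNat).erase log[i]
          = (recFull db (log.take i)).take cs.toNat := List.erase_of_not_mem hmem
      by_cases hcs : (0 : Int) ≤ cs
      · rw [PySem.List.slice_to _ hcs, ← he, cons_take_erase]
      · have hk0 : cs.toNat = 0 := by omega
        rw [hk0]
        simp only [List.take_zero]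
        rw [slice_single_neg _ cs (by omega)]

-- gluing: A's fold over the remaining suffix produces B's mapped entries
lemma glue (cs : Int) (db : List (String × String)) (log : List String) :
    ∀ (t : List String) (i : Nat) (r : List String) (cache : PySem.Dict String String)
      (res : List (List (String × Option String))),
      log.drop i = t → CacheInv cs db r cache →
      r = (recFull db (log.take i)).take cs.toNat →
      (t.foldl (stepA cs db) (cache, res)).2
        = res ++ (List.range' i t.length).map (entryB cs log db) := by
  intro t
  induction t with
  | nil =>
    intro i r cache res _ _ _
    simp
  | cons xx t ih =>
    intro i r cache res hdrop hinv hr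
    have hi : i < log.length := by
      by_contra hle
      rw [List.drop_eq_nil_of_le (by omega)] at hdrop
      exact List.cons_ne_nil _ _ hdrop.symm
    rw [List.drop_eq_getElem_cons hi] at hdrop
    obtain ⟨hxx, hdrop'⟩ : log[i] = xx ∧ log.drop (i + 1) = t := by
      injection hdrop with h1 h2
      exact ⟨h1, h2⟩
    have hstep := step_inv cs db xx r cache res hinv
    have he : (simStep cs db (r, res) xx).2 = res ++ [entryB cs log db i] := by
      rw [hr, ← hxx]
      exact entry_eq cs db log i hi res
    have hs : (simStep cs db (r, res) xx).1 = (recFull db (log.take (i + 1))).take cs.toNat := by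
      rw [hr, ← hxx]
      exact state_eq cs db log i hi res
    have hinv' := hstep.2
    rw [hs] at hinv'
    rw [List.foldl_cons,
      show stepA cs db (cache, res) xx
        = ((stepA cs db (cache, res) xx).1, (stepA cs db (cache, res) xx).2) from rfl,
      hstep.1, he]
    rw [ih (i + 1) _ _ _ hdrop' hinv' rfl]
    rw [List.length_cons, List.range'_succ, List.map_cons]
    simp

-- ===== VERDICT (by name: the statement is the Claim_ definition above) =====
theorem helper_spec : Claim_equal_helper := by
  intro cache_size log db _
  unfold Spec_helper helper helper_alt
  rw [PySem.List.foldl_append_singleton_eq_map, List.range_eq_range']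
  simpa using glue cache_size db log log 0 [] PySem.Dict.empty [] (by simp)
    ⟨List.nodup_nil, by simp, by simp, rfl⟩ (by simp [recFull])
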